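-- pv_equiv track=rewrite | github.com/BillyTheKidPhysicist/experimentControlAndAnalysis | LaserLineWidthAutomated.py | binarySearchCount
-- ===== SOURCE A (Python) =====
-- def binarySearchCount(arr, n, key):
--     left=0
--     right=n
--
--     mid=0
--     while (left<right):
--         mid=(right+left)//2
--
--         if (arr[mid]==key):
--
--             while (mid+1<n and arr[mid+1]==key):
--                 mid+=1
--             break
--
--         elif (arr[mid]>key):
--             right=mid
--
--         else:
--             left=mid+1
--
--     while (mid>-1 and arr[mid]>key):
--         mid-=1
--
--     return mid+1
-- ===== SOURCE B (Python) =====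
-- def binarySearchCount(arr, n, key):
--     count = 0
--     for i in range(n):
--         if arr[i] <= key:
--             count += 1
--     return count
-- ===== Notes on version B (the rewrite author's own statement) =====
-- stated objective: simpler
-- what changed: Replaces the binary search (probe loop + duplicate-advance + downward descent) by a single linear pass counting arr[i] <= key over range(n); Pre_ excludes n > len(arr) (A's probes can raise IndexError and B always does) and unsorted prefixes (binary search's contract, neither value specified).
-- intended difference: When n <= 0 but arr[0] <= key, A's leftover mid = 0 makes its final while accept index 0 and return 1, counting an element outside the first n; B returns 0, the correct count over an empty range. — e.g. on binarySearchCount([1], 0, 1): A returns 1, B returns 0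
-- outside the precondition, e.g. on binarySearchCount([1, 0], 2, 0): A returns 2, B returns 1; on binarySearchCount([1, 2, 3], 4, 2): A returns 2, B raises IndexError
import Mathlib
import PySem

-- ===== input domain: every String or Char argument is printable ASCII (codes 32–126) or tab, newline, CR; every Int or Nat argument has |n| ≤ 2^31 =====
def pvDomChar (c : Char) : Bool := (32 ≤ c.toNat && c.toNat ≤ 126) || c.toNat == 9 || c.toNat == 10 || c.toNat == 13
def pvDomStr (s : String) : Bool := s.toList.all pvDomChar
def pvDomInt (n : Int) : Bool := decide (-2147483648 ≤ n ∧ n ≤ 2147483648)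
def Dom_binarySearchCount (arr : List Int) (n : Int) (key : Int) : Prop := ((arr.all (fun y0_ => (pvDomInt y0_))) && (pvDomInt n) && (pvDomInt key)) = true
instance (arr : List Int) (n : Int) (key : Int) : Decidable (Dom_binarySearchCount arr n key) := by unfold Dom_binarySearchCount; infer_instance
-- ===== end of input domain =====

-- B replaces the binary search by a single linear counting pass (simpler); return values only.

-- ===== PORT A =====
-- inner 'while (mid+1<n and arr[mid+1]==key)' duplicate-advance loop
def pvDupAdvance (arr : List Int) (n key mid : Int) : Int :=
  if mid + 1 < n ∧ PySem.List.pyGetD arr (mid + 1) 0 = key then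
    pvDupAdvance arr n key (mid + 1)
  else mid
termination_by (n - mid).toNat
decreasing_by omega

-- final 'while (mid>-1 and arr[mid]>key)' descent, followed by 'return mid+1'
def pvDescend (arr : List Int) (key mid : Int) : Int :=
  if mid > -1 ∧ PySem.List.pyGetD arr mid 0 > key then
    pvDescend arr key (mid - 1)
  else mid + 1
termination_by (mid + 1).toNat
decreasing_by omega

-- main 'while (left<right)' binary-search loop carrying mid as state
def pvLoopA (arr : List Int) (n key left right mid : Int) : Int :=
  if left < right then
    let m := PySem.Int.floordiv (right + left) 2
    if PySem.List.pyGetD arr m 0 = key then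
      pvDescend arr key (pvDupAdvance arr n key m)
    else if PySem.List.pyGetD arr m 0 > key then
      pvLoopA arr n key left m m
    else
      pvLoopA arr n key (m + 1) right m
  else pvDescend arr key mid
termination_by (right - left).toNat
decreasing_by
  · have h2 : PySem.Int.floordiv (right + left) 2 < right :=
      (PySem.Int.floordiv_lt_iff_lt_mul (by norm_num)).2 (by omega)
    omega
  · have h1 : left ≤ PySem.Int.floordiv (right + left) 2 :=
      (PySem.Int.le_floordiv_iff_mul_le (by norm_num)).2 (by omega)
    have h2 : PySem.Int.floordiv (right + left) 2 < right :=
      (PySem.Int.floordiv_lt_iff_lt_mul (by norm_num)).2 (by omega)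
    omega

def binarySearchCount (arr : List Int) (n : Int) (key : Int) : Int :=
  pvLoopA arr n key 0 n 0

-- ===== PORT B =====
def binarySearchCount_alt (arr : List Int) (n : Int) (key : Int) : Int :=
  (PySem.List.pyRange 0 n 1).foldl
    (fun count i => if PySem.List.pyGetD arr i 0 ≤ key then count + 1 else count) 0

-- ===== PRECONDITION & SPEC =====
-- Pre_ excludes: empty arr (A raises IndexError on every admitted n), n > len(arr) (A's probes can
-- raise IndexError and B always does, see cites), and inputs whose first n elements are not sorted
-- nondecreasingly — binary search's sortedness contract, under which no particular result is
-- specified for either implementation (see cites).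
def Pre_binarySearchCount (arr : List Int) (n : Int) (key : Int) : Prop :=
  arr ≠ [] ∧ n ≤ (arr.length : Int) ∧ List.Pairwise (· ≤ ·) (arr.take n.toNat)
instance (arr : List Int) (n : Int) (key : Int) : Decidable (Pre_binarySearchCount arr n key) := by
  unfold Pre_binarySearchCount; infer_instance

def pvWitness_binarySearchCount : List Int × Int × Int := ([1, 2], 2, 1)

-- When n <= 0 but arr[0] <= key, A's leftover mid = 0 makes its final while accept index 0 and
-- return 1, counting an element outside the first n; B returns 0, the correct count over an empty range.
def D_binarySearchCount (arr : List Int) (n : Int) (key : Int) : Prop :=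
  n ≤ 0 ∧ arr.headD (key + 1) ≤ key
instance (arr : List Int) (n : Int) (key : Int) : Decidable (D_binarySearchCount arr n key) := by
  unfold D_binarySearchCount; infer_instance

def Spec_binarySearchCount (arr : List Int) (n : Int) (key : Int) (out : Int) : Prop :=
  ¬ D_binarySearchCount arr n key → out = binarySearchCount_alt arr n key
instance (arr : List Int) (n : Int) (key : Int) (out : Int) : Decidable (Spec_binarySearchCount arr n key out) := by
  unfold Spec_binarySearchCount; infer_instance

def pvDiffWitness_binarySearchCount : List Int × Int × Int := ([1], 0, 1)
def pvDiffWitnessOut_binarySearchCount : Int × Int := (1, 0)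

-- ===== CLAIM (what is proved, stated in full; the proofs are below) =====
def Claim_unchanged_binarySearchCount : Prop := ∀ (arr : List Int) (n : Int) (key : Int), Dom_binarySearchCount arr n key → Pre_binarySearchCount arr n key → Spec_binarySearchCount arr n key (binarySearchCount arr n key)
def Claim_changed_binarySearchCount : Prop := Dom_binarySearchCount (pvDiffWitness_binarySearchCount.1) (pvDiffWitness_binarySearchCount.2.1) (pvDiffWitness_binarySearchCount.2.2) ∧ Pre_binarySearchCount (pvDiffWitness_binarySearchCount.1) (pvDiffWitness_binarySearchCount.2.1) (pvDiffWitness_binarySearchCount.2.2) ∧ D_binarySearchCount (pvDiffWitness_binarySearchCount.1) (pvDiffWitness_binarySearchCount.2.1) (pvDiffWitness_binarySearchCount.2.2) ∧ binarySearchCount (pvDiffWitness_binarySearchCount.1) (pvDiffWitness_binarySearchCount.2.1) (pvDiffWitness_binarySearchCount.2.2) = pvDiffWitnessOut_binarySearchCount.1 ∧ binarySearchCount_alt (pvDiffWitness_binarySearchCount.1) (pvDiffWitness_binarySearchCount.2.1) (pvDiffWitness_binarySearchCount.2.2) = pvDiffWitnessOut_binarySearchCount.2 ∧ pvDiffWitnessOut_binarySearchCount.1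 ≠ pvDiffWitnessOut_binarySearchCount.2
def Claim_exact_binarySearchCount : Prop := ∀ (arr : List Int) (n : Int) (key : Int), Dom_binarySearchCount arr n key → Pre_binarySearchCount arr n key → D_binarySearchCount arr n key → binarySearchCount arr n key ≠ binarySearchCount_alt arr n key

-- ===== LEMMAS AND PROOFS =====

-- the count of elements ≤ key among the first n elements
def pvCnt (arr : List Int) (n key : Int) : Nat :=
  (arr.take n.toNat).countP (fun x => decide (x ≤ key))

lemma pvCount_char (xs : List Int) (key : Int) (hs : List.Pairwise (· ≤ ·) xs)
    (j : Nat) (hj : j < xs.length) :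
    xs[j] ≤ key ↔ j < xs.countP (fun x => decide (x ≤ key)) := by
  have hgm := List.pairwise_iff_getElem.1 hs
  constructor
  · intro h
    have htake : ∀ a ∈ xs.take (j + 1), (fun x => decide (x ≤ key)) a = true := by
      intro a ha
      obtain ⟨i, hi, rfl⟩ := List.mem_iff_getElem.1 ha
      have hij : i ≤ j := by simp [List.length_take] at hi; omega
      have hi' : i < xs.length := by omega
      simp only [List.getElem_take, decide_eq_true_eq]
      rcases Nat.lt_or_eq_of_le hij with h' | h'
      · exact le_trans (hgm i j hi' hj h') h
      · exact h' ▸ h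
    have hsplit : xs.countP (fun x => decide (x ≤ key)) =
        (xs.take (j + 1)).countP (fun x => decide (x ≤ key)) +
        (xs.drop (j + 1)).countP (fun x => decide (x ≤ key)) := by
      conv_lhs => rw [← List.take_append_drop (j + 1) xs]
      exact List.countP_append
    have h1 := List.countP_eq_length.2 htake
    have h2 : (xs.take (j + 1)).length = j + 1 := by rw [List.length_take]; omega
    omega
  · intro h
    by_contra hnot
    push Not at hnot
    have hdrop : ∀ a ∈ xs.drop j, ¬ (fun x => decide (x ≤ key)) a = true := by
      intro a ha
      obtain ⟨i, hi, rfl⟩ := List.mem_iff_getElem.1 ha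
      have hji : j + i < xs.length := by simp [List.length_drop] at hi; omega
      simp only [List.getElem_drop, decide_eq_true_eq, not_le]
      have hle : xs[j] ≤ xs[j + i] := by
        rcases Nat.eq_zero_or_pos i with h' | h'
        · subst h'; simp
        · exact hgm j (j + i) hj hji (by omega)
      exact lt_of_lt_of_le hnot hle
    have hz := List.countP_eq_zero.2 hdrop
    have hsplit : xs.countP (fun x => decide (x ≤ key)) =
        (xs.take j).countP (fun x => decide (x ≤ key)) +
        (xs.drop j).countP (fun x => decide (x ≤ key)) := by
      conv_lhs => rw [← List.take_append_drop j xs]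
      exact List.countP_append
    have hb : (xs.take j).countP (fun x => decide (x ≤ key)) ≤ j :=
      le_trans List.countP_le_length (by rw [List.length_take]; omega)
    omega

lemma pvChar (arr : List Int) (n key : Int) (hn : n ≤ (arr.length : Int))
    (hs : List.Pairwise (· ≤ ·) (arr.take n.toNat)) :
    ∀ i : Int, 0 ≤ i → i < n →
      (PySem.List.pyGetD arr i 0 ≤ key ↔ i < (pvCnt arr n key : Int)) := by
  intro i h0 hi
  rw [PySem.List.pyGetD_eq_getElem arr 0 h0 (by omega)]
  have hjt : i.toNat < (arr.take n.toNat).length := by simp [List.length_take]; omega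
  have hch := pvCount_char (arr.take n.toNat) key hs i.toNat hjt
  rw [List.getElem_take] at hch
  rw [hch]
  unfold pvCnt
  omega

lemma pvMono (arr : List Int) (n : Int) (hn : n ≤ (arr.length : Int))
    (hs : List.Pairwise (· ≤ ·) (arr.take n.toNat)) :
    ∀ i j : Int, 0 ≤ i → i ≤ j → j < n →
      PySem.List.pyGetD arr i 0 ≤ PySem.List.pyGetD arr j 0 := by
  intro i j h0 hij hj
  rw [PySem.List.pyGetD_eq_getElem arr 0 h0 (by omega),
      PySem.List.pyGetD_eq_getElem arr 0 (by omega) (by omega)]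
  rcases lt_or_eq_of_le hij with h' | h'
  · have := List.pairwise_iff_getElem.1 hs i.toNat j.toNat
      (by simp [List.length_take]; omega) (by simp [List.length_take]; omega) (by omega)
    rwa [List.getElem_take, List.getElem_take] at this
  · subst h'; exact le_refl _

lemma pvCnt_le (arr : List Int) (n key : Int) (h0 : 0 ≤ n) (hn : n ≤ (arr.length : Int)) :
    (pvCnt arr n key : Int) ≤ n := by
  unfold pvCnt
  have := List.countP_le_length (p := fun x => decide (x ≤ key)) (l := arr.take n.toNat)
  rw [List.length_take] at this
  omega

lemma pvDescend_correct (arr : List Int) (n key C : Int)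
    (hchar : ∀ i : Int, 0 ≤ i → i < n → (PySem.List.pyGetD arr i 0 ≤ key ↔ i < C))
    (hC0 : 0 ≤ C) :
    ∀ (k : Nat) (m : Int), m = C - 1 + k → m < n → pvDescend arr key m = C := by
  intro k
  induction k with
  | zero =>
    intro m hm hmn
    rw [pvDescend, if_neg]
    · omega
    · rintro ⟨h1, h2⟩
      have := (hchar m (by omega) hmn).2 (by omega)
      omega
  | succ k ih =>
    intro m hm hmn
    have hgt : PySem.List.pyGetD arr m 0 > key := by
      have := hchar m (by omega) hmn
      omega
    rw [pvDescend, if_pos ⟨by omega, hgt⟩]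
    exact ih (m - 1) (by omega) (by omega)

lemma pvDupAdvance_correct (arr : List Int) (n key C : Int)
    (hchar : ∀ i : Int, 0 ≤ i → i < n → (PySem.List.pyGetD arr i 0 ≤ key ↔ i < C))
    (hmono : ∀ i j : Int, 0 ≤ i → i ≤ j → j < n →
      PySem.List.pyGetD arr i 0 ≤ PySem.List.pyGetD arr j 0)
    (hCn : C ≤ n) :
    ∀ (k : Nat) (m : Int), (n - m).toNat ≤ k → 0 ≤ m → m < n →
      PySem.List.pyGetD arr m 0 = key → pvDupAdvance arr n key m = C - 1 := by
  intro k
  induction k with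
  | zero => intro m hk _ hmn _; omega
  | succ k ih =>
    intro m hk hm0 hmn hkey
    by_cases h : m + 1 < n ∧ PySem.List.pyGetD arr (m + 1) 0 = key
    · rw [pvDupAdvance, if_pos h]
      exact ih (m + 1) (by omega) (by omega) h.1 h.2
    · rw [pvDupAdvance, if_neg h]
      have hmC : m < C := (hchar m hm0 hmn).1 (le_of_eq hkey)
      have hCm : C ≤ m + 1 := by
        by_contra hc
        push Not at hc
        have h1n : m + 1 < n := by omega
        have hle : PySem.List.pyGetD arr (m + 1) 0 ≤ key :=
          (hchar (m + 1) (by omega) h1n).2 (by omega)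
        have hge : key ≤ PySem.List.pyGetD arr (m + 1) 0 :=
          hkey ▸ hmono m (m + 1) hm0 (by omega) h1n
        exact h ⟨h1n, le_antisymm hle hge⟩
      omega

lemma pvLoop_correct (arr : List Int) (n key C : Int)
    (hchar : ∀ i : Int, 0 ≤ i → i < n → (PySem.List.pyGetD arr i 0 ≤ key ↔ i < C))
    (hmono : ∀ i j : Int, 0 ≤ i → i ≤ j → j < n →
      PySem.List.pyGetD arr i 0 ≤ PySem.List.pyGetD arr j 0)
    (hC0 : 0 ≤ C) :
    ∀ (k : Nat) (left right mid : Int), (right - left).toNat ≤ k → 0 ≤ left → right ≤ n →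
      left ≤ C → C ≤ right → left < right → pvLoopA arr n key left right mid = C := by
  intro k
  induction k with
  | zero => intro left right mid hk _ _ _ _ hlr; omega
  | succ k ih =>
    intro left right mid hk hl0 hrn hlC hCr hlr
    have hml : left ≤ PySem.Int.floordiv (right + left) 2 :=
      (PySem.Int.le_floordiv_iff_mul_le (by norm_num)).2 (by omega)
    have hmr : PySem.Int.floordiv (right + left) 2 < right :=
      (PySem.Int.floordiv_lt_iff_lt_mul (by norm_num)).2 (by omega)
    rw [pvLoopA, if_pos hlr]
    simp only []
    set m := PySem.Int.floordiv (right + left) 2 with hmdef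
    by_cases h1 : PySem.List.pyGetD arr m 0 = key
    · rw [if_pos h1]
      rw [pvDupAdvance_correct arr n key C hchar hmono (by omega)
        (n - m).toNat m (le_refl _) (by omega) (by omega) h1]
      exact pvDescend_correct arr n key C hchar hC0 0 (C - 1) (by omega) (by omega)
    · rw [if_neg h1]
      by_cases h2 : PySem.List.pyGetD arr m 0 > key
      · rw [if_pos h2]
        have hCm : C ≤ m := by
          have := hchar m (by omega) (by omega)
          omega
        by_cases h3 : left < m
        · exact ih left m m (by omega) hl0 (by omega) hlC hCm h3
        · rw [pvLoopA, if_neg (by omega)]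
          exact pvDescend_correct arr n key C hchar hC0 1 m (by push_cast; omega) (by omega)
      · rw [if_neg h2]
        have hmC : m < C := by
          have := hchar m (by omega) (by omega)
          omega
        by_cases h3 : m + 1 < right
        · exact ih (m + 1) right m (by omega) (by omega) hrn (by omega) hCr h3
        · rw [pvLoopA, if_neg (by omega)]
          exact pvDescend_correct arr n key C hchar hC0 0 m (by omega) (by omega)

lemma pvFoldCount (l : List Int) (key : Int) :
    ∀ a : Int, l.foldl (fun acc x => if x ≤ key then acc + 1 else acc) a =
      a + (l.countP (fun x => decide (x ≤ key)) : Int) := by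
  induction l with
  | nil => intro a; simp
  | cons x t ih =>
    intro a
    simp only [List.foldl_cons, List.countP_cons, ih]
    by_cases h : x ≤ key <;> simp [h] <;> omega

lemma pvAlt_eq (arr : List Int) (n key : Int) (h0 : 1 ≤ n) (hn : n ≤ (arr.length : Int)) :
    binarySearchCount_alt arr n key = (pvCnt arr n key : Int) := by
  unfold binarySearchCount_alt pvCnt
  have hlenxs : (arr.take n.toNat).length = n.toNat := by rw [List.length_take]; omega
  have hlen : PySem.List.len (arr.take n.toNat) = n := by
    simp [PySem.List.len, hlenxs]; omega
  rw [PySem.List.foldl_congr_mem _ _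
    (fun count i => if PySem.List.pyGetD (arr.take n.toNat) i 0 ≤ key then count + 1 else count) 0
    (by
      intro acc x hx
      rcases PySem.List.mem_pyRange_one.1 hx with ⟨hx0, hxn⟩
      dsimp only
      rw [PySem.List.pyGetD_eq_getElem arr 0 hx0 (by omega),
          PySem.List.pyGetD_eq_getElem (arr.take n.toNat) 0 hx0 (by rw [hlenxs]; omega),
          List.getElem_take])]
  conv_lhs =>
    rw [show PySem.List.pyRange 0 n = PySem.List.pyRange 0 (PySem.List.len (arr.take n.toNat))
      from by rw [hlen]]
  rw [PySem.List.foldl_pyRange_zero_pyGetD (arr.take n.toNat) 0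
      (fun count v => if v ≤ key then count + 1 else count) 0,
    pvFoldCount]
  omega

lemma pvAlt_nonpos (arr : List Int) (n key : Int) (hn : n ≤ 0) :
    binarySearchCount_alt arr n key = 0 := by
  unfold binarySearchCount_alt
  rw [PySem.List.pyRange_one_eq_nil (by omega)]
  rfl

lemma pvA_nonpos (arr : List Int) (n key : Int) (hn : n ≤ 0) :
    binarySearchCount arr n key = pvDescend arr key 0 := by
  show pvLoopA arr n key 0 n 0 = pvDescend arr key 0
  rw [pvLoopA, if_neg (by omega)]

-- ===== VERDICT (by name: the statement is the Claim_ definition above) =====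
theorem binarySearchCount_spec : Claim_unchanged_binarySearchCount := by
  intro arr n key _hdom hpre hnd
  obtain ⟨hne, hn, hs⟩ := hpre
  show binarySearchCount arr n key = binarySearchCount_alt arr n key
  by_cases hpos : 0 < n
  · have hchar := pvChar arr n key hn hs
    have hmono := pvMono arr n hn hs
    have hC0 : (0 : Int) ≤ (pvCnt arr n key : Int) := Int.natCast_nonneg _
    have hCn : (pvCnt arr n key : Int) ≤ n := pvCnt_le arr n key (by omega) hn
    rw [pvAlt_eq arr n key (by omega) hn]
    exact pvLoop_correct arr n key (pvCnt arr n key : Int) hchar hmono hC0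
      n.toNat 0 n 0 (by omega) (by omega) (le_refl _) hC0 hCn hpos
  · have hhead : arr.headD (key + 1) > key := by
      by_contra hc
      exact hnd ⟨by omega, by omega⟩
    obtain ⟨a, t, rfl⟩ : ∃ a t, arr = a :: t := by
      cases arr with
      | nil => exact absurd rfl hne
      | cons a t => exact ⟨a, t, rfl⟩
    have hga : PySem.List.pyGetD (a :: t) 0 0 = a := by
      rw [PySem.List.pyGetD_eq_getElem _ 0 (by norm_num) (by simp)]; simp
    rw [pvA_nonpos _ n key (by omega), pvAlt_nonpos _ n key (by omega),
        pvDescend, if_pos ⟨by norm_num, by rw [hga]; simpa using hhead⟩,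
        pvDescend, if_neg (fun h => lt_irrefl (-1 : Int) (by exact_mod_cast h.1))]
    norm_num

theorem binarySearchCount_changed : Claim_changed_binarySearchCount := by
  unfold Claim_changed_binarySearchCount
  refine ⟨by decide, by decide, by decide, ?_, by decide, by decide⟩
  show binarySearchCount [1] 0 1 = 1
  show pvLoopA [1] 0 1 0 0 0 = 1
  have hga : PySem.List.pyGetD [1] 0 0 = (1 : Int) := by
    rw [PySem.List.pyGetD_eq_getElem _ 0 (by norm_num) (by simp)]; simp
  rw [pvLoopA, if_neg (by norm_num), pvDescend,
      if_neg (fun h => by rw [hga] at h; exact absurd h.2 (by norm_num))]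
  norm_num

theorem binarySearchCount_tight : Claim_exact_binarySearchCount := by
  intro arr n key _hdom hpre hd
  obtain ⟨hne, hn, hs⟩ := hpre
  obtain ⟨hn0, hhead⟩ := hd
  obtain ⟨a, t, rfl⟩ : ∃ a t, arr = a :: t := by
    cases arr with
    | nil => exact absurd rfl hne
    | cons a t => exact ⟨a, t, rfl⟩
  have hga : PySem.List.pyGetD (a :: t) 0 0 = a := by
    rw [PySem.List.pyGetD_eq_getElem _ 0 (by norm_num) (by simp)]; simp
  have hA : binarySearchCount (a :: t) n key = 1 := by
    rw [pvA_nonpos _ n key hn0, pvDescend,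
        if_neg (by rintro ⟨_, h2⟩; rw [hga] at h2; simp at hhead; omega)]
    norm_num
  rw [hA, pvAlt_nonpos _ n key hn0]
  norm_num
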